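-- pv_equiv track=rewrite | github.com/amoralesc/analisis-algoritmos-2230 | tareas/minesweeper/minesweeper.py | find_mines_bf
-- ===== SOURCE A (Python) =====
-- import sys, random, itertools, pprint
--
-- def find_mines_bf(grid: list, m: int) -> list:
--     # Find the m mines by brute force
--     # Basically, compute all m-combinations of the [i][j] pairs
--     # and check if they are the mines. Eventually, we will find
--     # the correct combination.
--
--     # First, create the list of all possible pairs
--     pairs = []
--     for i in range(len(grid)):
--         for j in range(len(grid)):
--             pairs += [(i, j)]
--
--     # Now, compute all m-combinations of the pairs
--     # and check if they are the mines
--     for mines in itertools.combinations(pairs, m):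
--         all_mines = True
--         k = 0
--         while k < m and all_mines:
--             mine = mines[k]
--             if grid[mine[0]][mine[1]] != 1:
--                 all_mines = False
--             k += 1
--         if all_mines:
--             return list(mines)
--
--     return []
-- ===== SOURCE B (Python) =====
-- def find_mines_bf(grid: list, m: int) -> list:
--     # Single row-major scan: the lexicographically first all-mine combination
--     # is just the first m cells equal to 1 in row-major order.
--     n = len(grid)
--     ones = [(i, j) for i in range(n) for j in range(n) if grid[i][j] == 1]
--     return ones[:m] if len(ones) >= m else []
-- ===== Notes on version B (the rewrite author's own statement) =====
-- stated objective: faster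
-- what changed: Replaced the brute-force search over all m-combinations of cell coordinates with a single row-major scan that collects the cells equal to 1 and returns the first m of them (the lexicographically first all-mine combination).
-- outside the precondition, e.g. on find_mines_bf([[1, 1], [1]], 1): A returns [(0, 0)], B raises IndexError
import Mathlib
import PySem

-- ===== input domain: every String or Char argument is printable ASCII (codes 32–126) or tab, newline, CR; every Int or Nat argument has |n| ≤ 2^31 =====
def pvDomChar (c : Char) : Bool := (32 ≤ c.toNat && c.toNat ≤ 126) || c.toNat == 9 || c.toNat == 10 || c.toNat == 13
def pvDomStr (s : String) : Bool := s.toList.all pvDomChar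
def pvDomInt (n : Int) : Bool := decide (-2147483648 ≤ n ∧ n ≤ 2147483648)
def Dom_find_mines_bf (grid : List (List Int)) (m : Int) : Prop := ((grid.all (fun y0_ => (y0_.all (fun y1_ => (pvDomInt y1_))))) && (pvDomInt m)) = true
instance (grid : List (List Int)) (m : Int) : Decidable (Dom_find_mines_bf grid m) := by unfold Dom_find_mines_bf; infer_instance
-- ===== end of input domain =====

-- B replaces A's brute-force search over all m-combinations of coordinates by a
-- single row-major scan collecting the cells equal to 1 and taking the first m.


-- ===== PORT A =====
-- grid[i][j]: exact under Pre_ (both indices in range there); Python raises IndexError out of range.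
def pvCell (grid : List (List Int)) (i j : Int) : Int :=
  ((PySem.List.pyGet? grid i).bind (fun r => PySem.List.pyGet? r j)).getD 0

-- A's 'while k < m and all_mines' loop
def pvCheckLoop (grid : List (List Int)) (m : Int) (mines : List (Int × Int))
    (k : Nat) (all_mines : Bool) : Bool :=
  if h : (k : Int) < m ∧ all_mines = true then
    let mine := (PySem.List.pyGet? mines (k : Int)).getD (0, 0)
    let all' := if pvCell grid mine.1 mine.2 ≠ 1 then false else all_mines
    pvCheckLoop grid m mines (k + 1) all'
  else all_mines
termination_by (m - (k : Int)).toNat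
decreasing_by omega

-- A's 'for mines in itertools.combinations(...): ... if all_mines: return list(mines)'
def pvSearch (grid : List (List Int)) (m : Int) : List (List (Int × Int)) → List (Int × Int)
  | [] => []
  | t :: rest => if pvCheckLoop grid m t 0 true then t else pvSearch grid m rest

def find_mines_bf (grid : List (List Int)) (m : Int) : List (Int × Int) :=
  let n := grid.length
  let pairs : List (Int × Int) :=
    (PySem.List.pyRange 0 (n : Int) 1).foldl
      (fun acc i => (PySem.List.pyRange 0 (n : Int) 1).foldl
        (fun acc2 j => acc2 ++ [(i, j)]) acc) []
  pvSearch grid m (PySem.List.combinations pairs m.toNat)   -- m ≥ 0 under Pre_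

-- ===== PORT B =====
def find_mines_bf_alt (grid : List (List Int)) (m : Int) : List (Int × Int) :=
  let n := grid.length
  let ones : List (Int × Int) :=
    (PySem.List.pyRange 0 (n : Int) 1).flatMap
      (fun i => (PySem.List.pyRange 0 (n : Int) 1).flatMap
        (fun j => if pvCell grid i j = 1 then [(i, j)] else []))
  if m ≤ (ones.length : Int) then PySem.List.slice ones none (some m) else []

-- ===== PRECONDITION & SPEC =====
-- Pre_ excludes m < 0 (A raises ValueError) and ragged grids having a row shorter than
-- len(grid): there B's full row-major scan raises IndexError, and A itself usually raises
-- IndexError too (A returns only when its combination search ends before touching a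
-- missing cell — see the cite in claim.json).
def Pre_find_mines_bf (grid : List (List Int)) (m : Int) : Prop :=
  0 ≤ m ∧ ∀ row ∈ grid, grid.length ≤ row.length
instance (grid : List (List Int)) (m : Int) : Decidable (Pre_find_mines_bf grid m) := by
  unfold Pre_find_mines_bf; infer_instance
def pvWitness_find_mines_bf : List (List Int) × Int := ([[1, 0], [0, 1]], 2)

def Spec_find_mines_bf (grid : List (List Int)) (m : Int) (out : List (Int × Int)) : Prop := out = find_mines_bf_alt grid m
instance (grid : List (List Int)) (m : Int) (out : List (Int × Int)) : Decidable (Spec_find_mines_bf grid m out) := by unfold Spec_find_mines_bf; infer_instance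

-- ===== CLAIM (what is proved, stated in full; the proofs are below) =====
def Claim_equal_find_mines_bf : Prop := ∀ (grid : List (List Int)) (m : Int), Dom_find_mines_bf grid m → Pre_find_mines_bf grid m → Spec_find_mines_bf grid m (find_mines_bf grid m)

-- ===== LEMMAS AND PROOFS =====

-- once all_mines is false the while loop returns false
theorem pvCheckLoop_false (grid : List (List Int)) (m : Int) (mines : List (Int × Int))
    (k : Nat) : pvCheckLoop grid m mines k false = false := by
  rw [pvCheckLoop]; simp

-- the while loop checks that every cell from index k on is a mine
theorem pvCheckLoop_eq_all_aux (grid : List (List Int)) (m : Int) (w : List (Int × Int))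
    (hm : (w.length : Int) = m) :
    ∀ (n k : Nat), w.length - k ≤ n → k ≤ w.length →
      pvCheckLoop grid m w k true = (w.drop k).all (fun q => pvCell grid q.1 q.2 == 1) := by
  intro n
  induction n with
  | zero =>
    intro k hn hk
    have hkl : k = w.length := by omega
    rw [pvCheckLoop]
    have : ¬ ((k : Int) < m ∧ (true = true)) := by simp; omega
    rw [dif_neg this]
    simp [hkl]
  | succ n ih =>
    intro k hn hk
    by_cases hlt : k < w.length
    · rw [pvCheckLoop]
      have hkm : ((k : Int) < m ∧ (true = true)) := by refine ⟨by omega, rfl⟩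
      rw [dif_pos hkm]
      have hget : (PySem.List.pyGet? w (k : Int)).getD (0, 0) = w[k] := by
        rw [PySem.List.pyGet?_natCast, List.getElem?_eq_getElem hlt]; rfl
      rw [List.drop_eq_getElem_cons hlt, List.all_cons]
      simp only [hget]
      by_cases hp : pvCell grid (w[k].1) (w[k].2) = 1
      · simp only [hp, ne_eq, not_true_eq_false, if_false]
        rw [ih (k+1) (by omega) (by omega)]
        simp [hp]
      · simp only [ne_eq, hp, not_false_eq_true, if_true]
        rw [pvCheckLoop_false]
        simp [hp]
    · have hkl : k = w.length := by omega
      rw [pvCheckLoop]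
      have : ¬ ((k : Int) < m ∧ (true = true)) := by simp; omega
      rw [dif_neg this]
      simp [hkl]

theorem pvCheckLoop_eq_all (grid : List (List Int)) (m : Int) (w : List (Int × Int))
    (hm : (w.length : Int) = m) :
    pvCheckLoop grid m w 0 true = w.all (fun q => pvCell grid q.1 q.2 == 1) := by
  simpa using pvCheckLoop_eq_all_aux grid m w hm w.length 0 (by omega) (by omega)

-- core: the first all-mines combination, in itertools' lex order, is the first r mine cells
theorem pv_combos_find {α : Type} (p : α → Bool) (l : List α) (r : Nat) :
    (PySem.List.combinations l r).find? (fun t => t.all p) =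
      if r ≤ (l.filter p).length then some ((l.filter p).take r) else none := by
  induction l generalizing r with
  | nil =>
    cases r with
    | zero => simp [PySem.List.combinations_zero]
    | succ r => simp [PySem.List.combinations_nil_succ]
  | cons x xs ih =>
    cases r with
    | zero => simp [PySem.List.combinations_zero]
    | succ r =>
      rw [PySem.List.combinations_cons_succ, List.find?_append, List.find?_map]
      by_cases hx : p x = true
      · have hcomp : ((fun t => t.all p) ∘ (fun t => x :: t)) = (fun t : List α => t.all p) := by
          funext t; simp [hx]
        rw [hcomp, ih r, ih (r + 1)]
        rw [List.filter_cons_of_pos hx]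
        by_cases hr : r ≤ (xs.filter p).length
        · have hr2 : r + 1 ≤ (x :: xs.filter p).length := by
            simp only [List.length_cons]; omega
          rw [if_pos hr, if_pos hr2]
          simp
        · have hr2 : ¬ (r + 1 ≤ (x :: xs.filter p).length) := by
            simp only [List.length_cons]; omega
          rw [if_neg hr, if_neg (by omega), if_neg hr2]
          simp
      · have hcomp : ((fun t => t.all p) ∘ (fun t => x :: t)) = (fun _ : List α => false) := by
          funext t; simp [List.all_cons, hx]
        rw [hcomp, ih (r + 1), List.filter_cons_of_neg (by simp [hx])]
        have hnone : (PySem.List.combinations xs r).find? (fun _ => false) = none :=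
          List.find?_eq_none.mpr (by simp)
        simp [hnone]

theorem pv_find?_congr {α : Type} (l : List α) (f g : α → Bool)
    (h : ∀ t ∈ l, f t = g t) : l.find? f = l.find? g := by
  induction l with
  | nil => rfl
  | cons x xs ih =>
    simp only [List.find?_cons, h x (by simp)]
    cases g x <;> simp [ih (fun t ht => h t (by simp [ht]))]

theorem pv_filter_map_eq_flatMap {α β : Type} (l : List α) (f : α → β) (p : β → Bool) :
    (l.map f).filter p = l.flatMap (fun x => if p (f x) then [f x] else []) := by
  induction l with
  | nil => rfl
  | cons x xs ih =>
    simp only [List.map_cons, List.filter_cons, List.flatMap_cons, ← ih]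
    cases h : p (f x) <;> simp

theorem pvSearch_eq_find? (grid : List (List Int)) (m : Int) (cs : List (List (Int × Int))) :
    pvSearch grid m cs = (cs.find? (fun t => pvCheckLoop grid m t 0 true)).getD [] := by
  induction cs with
  | nil => rfl
  | cons t rest ih =>
    simp only [pvSearch, List.find?_cons]
    cases h : pvCheckLoop grid m t 0 true <;> simp [ih]

theorem find_mines_bf_spec' (grid : List (List Int)) (m : Int) (hm : 0 ≤ m) :
    find_mines_bf grid m = find_mines_bf_alt grid m := by
  simp only [find_mines_bf, find_mines_bf_alt]
  set R := PySem.List.pyRange 0 ((grid.length : Nat) : Int) 1 with hR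
  have h1 : (fun (acc : List (Int × Int)) (i : Int) =>
        R.foldl (fun acc2 j => acc2 ++ [(i, j)]) acc) =
      (fun acc i => acc ++ R.map (fun j => (i, j))) := by
    funext acc i; exact PySem.List.foldl_append_singleton_eq_map _ _ _
  rw [h1, PySem.List.foldl_append_eq_flatMap, List.nil_append]
  set pairs := R.flatMap (fun i => R.map (fun j => (i, j))) with hpairs
  set ones := R.flatMap (fun i => R.flatMap
      (fun j => if pvCell grid i j = 1 then [(i, j)] else [])) with hones
  have hfo : pairs.filter (fun q => pvCell grid q.1 q.2 == 1) = ones := by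
    rw [hpairs, hones, List.filter_flatMap]
    refine congrArg (fun g => List.flatMap g R) (funext fun i => ?_)
    rw [pv_filter_map_eq_flatMap]
    refine congrArg (fun g => List.flatMap g R) (funext fun j => ?_)
    by_cases h : pvCell grid i j = 1 <;> simp [h]
  rw [pvSearch_eq_find?,
    pv_find?_congr _ _ (fun t => t.all (fun q => pvCell grid q.1 q.2 == 1))
      (fun t ht => pvCheckLoop_eq_all grid m t
        (by rw [PySem.List.length_of_mem_combinations ht]; omega)),
    pv_combos_find, hfo, PySem.List.slice_to _ hm]
  by_cases h : m.toNat ≤ ones.length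
  · rw [if_pos h, if_pos (by omega)]; rfl
  · rw [if_neg h, if_neg (by omega)]; rfl

-- ===== VERDICT (by name: the statement is the Claim_ definition above) =====
theorem find_mines_bf_spec : Claim_equal_find_mines_bf := by
  intro grid m _ hpre
  exact find_mines_bf_spec' grid m hpre.1
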